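-- pv_equiv track=rewrite | github.com/psyray/oasis | oasis/structured_output/json_repair_scan.py | scan_open_delimiter_stack_outside_strings
-- ===== SOURCE A (Python) =====
-- from typing import List, Optional
--
-- def scan_open_delimiter_stack_outside_strings(candidate: str) -> Optional[List[str]]:
--     """
--     Walk ``candidate`` and track ``{``/``[`` stack outside JSON double-quoted strings.
--
--     **Pre:** ``candidate`` is the buffer to scan (may be truncated LLM output).
--
--     **Post:**
--     - Returns a list of still-open ``{`` / ``[`` (in order) if the scan ends **outside**
--       a string and no structural mismatch occurred.
--     - Returns ``None`` if a closer has no opener, brace/bracket types mismatch, or the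
--       scan ends **inside** an unterminated string (unsafe to append synthetic closers).
--
--     **State sketch** (``O`` = outside string, ``I`` = inside ``"..."``)::
--
--         O -- '"' ------------------------> I
--         O -- '{' '[' --------------------> push on stack (stay O)
--         O -- '}' ']' --------------------> pop; empty/mismatch -> None
--         I -- '\\' -----------------------> next char skipped (escaped)
--         I -- '"' (not after '\\') ------> O
--         I -- other ----------------------> stay I
--
--     **Edge cases:** ``]`` / ``}`` inside a string do not touch the stack. Truncation
--     mid-string leaves ``I`` at EOF -> ``None`` (caller must not append closers).
--
--     **Examples:**
--
--     - ``{"a":1`` → ``["{"]`` (truncated object; caller may append ``}``).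
--     - ``{"a":1}`` → ``[]`` (balanced).
--     - ``{]`` → ``None`` (malformed; do not balance).
--     - ``{"x":"`` → ``None`` (truncated inside string).
--     """
--     stack: List[str] = []
--     in_string = False
--     escaped = False
--     for ch in candidate:
--         if in_string:
--             if escaped:
--                 escaped = False
--                 continue
--             if ch == "\\":
--                 escaped = True
--                 continue
--             if ch == '"':
--                 in_string = False
--             continue
--
--         if ch == '"':
--             in_string = True
--             escaped = False
--             continue
--         if ch in "{[":
--             stack.append(ch)
--             continue
--         if ch in "}]":
--             if not stack:
--                 return None
--             top = stack[-1]
--             if ch == "}" and top != "{":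
--                 return None
--             if ch == "]" and top != "[":
--                 return None
--             stack.pop()
--             continue
--
--     return None if in_string else stack
-- ===== SOURCE B (Python) =====
-- from typing import List, Optional
--
-- _MATCHING_OPENER = {'}': '{', ']': '['}
--
-- def _delimiter_tokens(candidate: str) -> Optional[List[str]]:
--     """Pass 1: strip double-quoted string spans (consuming backslash escapes)
--     and return the outside-string delimiter characters, in order.
--     Returns None when the scan ends inside an unterminated string."""
--     tokens: List[str] = []
--     i = 0
--     n = len(candidate)
--     while i < n:
--         ch = candidate[i]
--         if ch == '"':
--             # consume the whole quoted span
--             i += 1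
--             while i < n:
--                 if candidate[i] == '\\':
--                     i += 2
--                 elif candidate[i] == '"':
--                     i += 1
--                     break
--                 else:
--                     i += 1
--             else:
--                 return None  # EOF inside the string: unterminated
--             continue
--         if ch in '{}[]':
--             tokens.append(ch)
--         i += 1
--     return tokens
--
-- def scan_open_delimiter_stack_outside_strings(candidate: str) -> Optional[List[str]]:
--     tokens = _delimiter_tokens(candidate)
--     if tokens is None:
--         return None
--     # Pass 2: match the delimiter tokens with a stack.
--     stack: List[str] = []
--     for tok in tokens:
--         if tok in '{[':
--             stack.append(tok)
--         elif not stack or stack[-1] != _MATCHING_OPENER[tok]: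
--             return None
--         else:
--             stack.pop()
--     return stack
-- ===== Notes on version B (the rewrite author's own statement) =====
-- stated objective: alternative
-- what changed: Replaces A's single four-state FSM-with-stack loop by a two-pass decomposition: pass 1 strips double-quoted string spans (with an index-based scanner that consumes escapes) and collects only the outside-string delimiter characters, returning None on an unterminated string; pass 2 runs the push/pop bracket-matching over that token list.
import Mathlib
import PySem

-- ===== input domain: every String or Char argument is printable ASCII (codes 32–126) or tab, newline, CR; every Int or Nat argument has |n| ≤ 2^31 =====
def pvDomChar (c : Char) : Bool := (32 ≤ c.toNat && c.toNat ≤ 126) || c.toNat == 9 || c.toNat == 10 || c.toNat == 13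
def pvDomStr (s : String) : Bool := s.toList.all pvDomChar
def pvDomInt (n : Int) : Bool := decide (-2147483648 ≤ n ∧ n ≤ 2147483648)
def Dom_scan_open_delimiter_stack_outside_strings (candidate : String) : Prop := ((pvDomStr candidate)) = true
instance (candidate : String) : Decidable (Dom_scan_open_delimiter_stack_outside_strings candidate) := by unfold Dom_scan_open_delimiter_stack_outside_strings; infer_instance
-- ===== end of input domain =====

-- B splits A's single flat state machine into two passes: a string-stripping
-- tokenizer collecting the outside-string delimiters, then a separate
-- stack-matching pass over those tokens (objective: alternative decomposition).


-- ===== PORT A =====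
-- A's single loop over the characters: state (stack, in_string, escaped), branches in A's order.
def pvALoop : List Char → List String → Bool → Bool → Option (List String)
  | [], stack, instr, _esc => if instr then none else some stack
  | ch :: rest, stack, instr, esc =>
    if instr then
      if esc then pvALoop rest stack true false
      else if ch = '\\' then pvALoop rest stack true true
      else if ch = '"' then pvALoop rest stack false false
      else pvALoop rest stack true false
    else
      if ch = '"' then pvALoop rest stack true false
      else if ch = '{' ∨ ch = '[' then pvALoop rest (stack ++ [String.ofList [ch]]) false false
      else if ch = '}' ∨ ch = ']' then
        match stack.getLast? with
        | none => none
        | some top =>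
          if ch = '}' ∧ top ≠ "{" then none
          else if ch = ']' ∧ top ≠ "[" then none
          else pvALoop rest stack.dropLast false false
      else pvALoop rest stack false false

def scan_open_delimiter_stack_outside_strings (candidate : String) : Option (List String) :=
  pvALoop candidate.toList [] false false

-- ===== PORT B =====
-- Source B's inner while loop: consume a double-quoted span; none = EOF inside the string.
def pvSkipStr : List Char → Option (List Char)
  | [] => none
  | c :: rest =>
    if c = '\\' then
      match rest with
      | [] => none
      | _ :: r => pvSkipStr r
    else if c = '"' then some rest
    else pvSkipStr rest

-- length lemma cited by pvTokens' decreasing_by (termination of the port)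
theorem pvSkipStr_lt : ∀ (l l' : List Char), pvSkipStr l = some l' → l'.length < l.length := by
  intro l
  fun_induction pvSkipStr l <;> intro l' h' <;> simp_all <;> omega

-- Source B pass 1 (_delimiter_tokens): the outside-string delimiter characters, in order;
-- none when the scan ends inside an unterminated string.
def pvTokens : List Char → Option (List Char)
  | [] => some []
  | ch :: rest =>
    if ch = '"' then
      match h : pvSkipStr rest with
      | none => none
      | some rest' => pvTokens rest'
    else if ch = '{' ∨ ch = '}' ∨ ch = '[' ∨ ch = ']' then
      (pvTokens rest).map (fun ts => ch :: ts)
    else pvTokens rest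
termination_by l => l.length
decreasing_by
  · exact Nat.lt_succ_of_lt (pvSkipStr_lt _ _ h)
  · simp
  · simp

-- Source B pass 2: match the delimiter tokens with a stack.
def pvMatchToks : List Char → List String → Option (List String)
  | [], stack => some stack
  | t :: rest, stack =>
    if t = '{' ∨ t = '[' then pvMatchToks rest (stack ++ [String.ofList [t]])
    else
      match stack.getLast? with
      | none => none
      | some top =>
        if top ≠ (if t = '}' then "{" else "[") then none
        else pvMatchToks rest stack.dropLast

def scan_open_delimiter_stack_outside_strings_alt (candidate : String) : Option (List String) :=
  match pvTokens candidate.toList with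
  | none => none
  | some ts => pvMatchToks ts []

-- ===== PRECONDITION & SPEC =====
def Spec_scan_open_delimiter_stack_outside_strings (candidate : String) (out : Option (List String)) : Prop := out = scan_open_delimiter_stack_outside_strings_alt candidate
instance (candidate : String) (out : Option (List String)) : Decidable (Spec_scan_open_delimiter_stack_outside_strings candidate out) := by unfold Spec_scan_open_delimiter_stack_outside_strings; infer_instance

-- ===== CLAIM (what is proved, stated in full; the proofs are below) =====
def Claim_equal_scan_open_delimiter_stack_outside_strings : Prop := ∀ (candidate : String), Dom_scan_open_delimiter_stack_outside_strings candidate → Spec_scan_open_delimiter_stack_outside_strings candidate (scan_open_delimiter_stack_outside_strings candidate)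

-- ===== LEMMAS AND PROOFS =====

-- A's in-string scanning equals "skip the quoted span, then resume outside".
theorem pvALoop_instr (l : List Char) (stack : List String) :
    pvALoop l stack true false =
      match pvSkipStr l with
      | none => none
      | some l' => pvALoop l' stack false false := by
  fun_induction pvSkipStr l <;> simp_all [pvALoop]

theorem pvMain (l : List Char) : ∀ (stack : List String),
    pvALoop l stack false false = (pvTokens l).bind (fun ts => pvMatchToks ts stack) := by
  fun_induction pvTokens l with
  | case1 => intro stack; simp [pvALoop, pvMatchToks]
  | case2 =>
      rename_i r h
      intro stack; simp [pvALoop, pvALoop_instr, h]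
  | case3 =>
      rename_i r rest' h ih
      intro stack; simp [pvALoop, pvALoop_instr, h, ih]
  | case4 =>
      rename_i ch r hq hdelim ih
      intro stack
      rcases hdelim with h | h | h | h <;> subst h <;>
        cases htk : pvTokens r <;>
        first
          | (simp [pvALoop, pvMatchToks, ih, htk]; try (cases stack.getLast? <;> rfl))
          | (cases hl : stack.getLast? with
             | none => simp [pvALoop, pvMatchToks, ih, htk, hl]
             | some top =>
                 by_cases htop : top = "{" <;> by_cases htop2 : top = "[" <;>
                   simp_all [pvALoop, pvMatchToks, htk, hl])
  | case5 =>
      rename_i ch r hq hdelim ih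
      intro stack
      have h1 : ¬ (ch = '{' ∨ ch = '[') := by tauto
      have h2 : ¬ (ch = '}' ∨ ch = ']') := by tauto
      simp [pvALoop, hq, h1, h2, ih]

-- ===== VERDICT (by name: the statement is the Claim_ definition above) =====
theorem scan_open_delimiter_stack_outside_strings_spec : Claim_equal_scan_open_delimiter_stack_outside_strings := by
  intro candidate _
  unfold Spec_scan_open_delimiter_stack_outside_strings
  unfold scan_open_delimiter_stack_outside_strings scan_open_delimiter_stack_outside_strings_alt
  rw [pvMain]
  cases pvTokens candidate.toList <;> rfl
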